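-- pv_equiv track=rewrite | github.com/mandosclaw/swarmpulse-results | missions/oss-supply-chain-compromise-monitor/typosquatting-detector.py | _check_insertion_deletion
-- ===== SOURCE A (Python) =====
-- def _check_insertion_deletion(suspicious: str, legitimate: str) -> bool:
--     """Check for single character insertion/deletion."""
--     sus_lower = suspicious.lower()
--     leg_lower = legitimate.lower()
--
--     # Check deletion (legitimate has extra char)
--     for i in range(len(leg_lower)):
--         if sus_lower == leg_lower[:i] + leg_lower[i+1:]:
--             return True
--
--     # Check insertion (suspicious has extra char)
--     for i in range(len(sus_lower)):
--         if sus_lower[:i] + sus_lower[i+1:] == leg_lower: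
--             return True
--
--     return False
-- ===== SOURCE B (Python) =====
-- def _check_insertion_deletion(suspicious: str, legitimate: str) -> bool:
--     """Check for single character insertion/deletion (linear two-pointer scan)."""
--     s = suspicious.lower()
--     l = legitimate.lower()
--     if len(s) == len(l) + 1:
--         longer, shorter = s, l
--     elif len(l) == len(s) + 1:
--         longer, shorter = l, s
--     else:
--         return False
--     i = 0
--     n = len(shorter)
--     while i < n and longer[i] == shorter[i]:
--         i += 1
--     return longer[i+1:] == shorter[i:]
-- ===== Notes on version B (the rewrite author's own statement) =====
-- stated objective: faster
-- what changed: A tries every deletion position building a new string per position (quadratic); B checks that the lengths differ by exactly 1 and then does one linear two-pointer scan to the first mismatch, comparing the remaining suffixes.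
import Mathlib
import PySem

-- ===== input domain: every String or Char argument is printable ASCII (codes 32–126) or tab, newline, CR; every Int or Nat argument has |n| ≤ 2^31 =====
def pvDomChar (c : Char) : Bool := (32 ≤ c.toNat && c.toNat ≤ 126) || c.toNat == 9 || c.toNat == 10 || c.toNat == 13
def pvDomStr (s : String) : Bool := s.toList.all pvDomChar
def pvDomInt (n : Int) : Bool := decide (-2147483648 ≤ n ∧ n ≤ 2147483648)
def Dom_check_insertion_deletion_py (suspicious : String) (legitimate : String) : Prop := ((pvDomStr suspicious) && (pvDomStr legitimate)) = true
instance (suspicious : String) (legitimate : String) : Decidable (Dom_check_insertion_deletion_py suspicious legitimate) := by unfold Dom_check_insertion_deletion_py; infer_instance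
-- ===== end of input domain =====

-- B replaces A's quadratic try-every-deletion-position loops by a length check plus one linear
-- two-pointer scan to the first mismatch (objective: faster, O(n) instead of O(n^2)).

-- ===== PORT A =====
def check_insertion_deletion_py (suspicious : String) (legitimate : String) : Bool :=
  let sus := PySem.Chars.lower suspicious.toList
  let leg := PySem.Chars.lower legitimate.toList
  -- for i in range(len(leg_lower)): if sus_lower == leg_lower[:i] + leg_lower[i+1:]: return True
  if (PySem.List.pyRange 0 leg.length 1).any (fun i =>
      sus == PySem.List.slice leg none (some i) ++ PySem.List.slice leg (some (i + 1)) none) then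
    true
  -- for i in range(len(sus_lower)): if sus_lower[:i] + sus_lower[i+1:] == leg_lower: return True
  else if (PySem.List.pyRange 0 sus.length 1).any (fun i =>
      PySem.List.slice sus none (some i) ++ PySem.List.slice sus (some (i + 1)) none == leg) then
    true
  else
    false

-- ===== PORT B =====
-- the while loop of Source B: advance while the heads agree, then compare longer[i+1:] with shorter[i:]
def pvScan : List Char → List Char → Bool
  | a :: as, b :: bs => if a == b then pvScan as bs else as == b :: bs
  | as, [] => as.drop 1 == ([] : List Char)
  | [], _ :: _ => false

def check_insertion_deletion_py_alt (suspicious : String) (legitimate : String) : Bool :=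
  let s := PySem.Chars.lower suspicious.toList
  let l := PySem.Chars.lower legitimate.toList
  if s.length == l.length + 1 then pvScan s l
  else if l.length == s.length + 1 then pvScan l s
  else false

-- ===== PRECONDITION & SPEC =====
def Spec_check_insertion_deletion_py (suspicious : String) (legitimate : String) (out : Bool) : Prop := out = check_insertion_deletion_py_alt suspicious legitimate
instance (suspicious : String) (legitimate : String) (out : Bool) : Decidable (Spec_check_insertion_deletion_py suspicious legitimate out) := by unfold Spec_check_insertion_deletion_py; infer_instance

-- ===== CLAIM (what is proved, stated in full; the proofs are below) =====
def Claim_equal_check_insertion_deletion_py : Prop := ∀ (suspicious : String) (legitimate : String), Dom_check_insertion_deletion_py suspicious legitimate → Spec_check_insertion_deletion_py suspicious legitimate (check_insertion_deletion_py suspicious legitimate)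

-- ===== LEMMAS AND PROOFS =====

-- the two-pointer scan succeeds exactly when the shorter string is the longer one with one char erased
lemma pvScan_iff (shorter longer : List Char) (h : longer.length = shorter.length + 1) :
    pvScan longer shorter = true ↔ ∃ k < longer.length, shorter = longer.eraseIdx k := by
  induction shorter generalizing longer with
  | nil =>
    obtain ⟨a, rest, rfl⟩ : ∃ a rest, longer = a :: rest := by
      cases longer with
      | nil => simp at h
      | cons a rest => exact ⟨a, rest, rfl⟩
    have : rest = [] := by simpa using h
    subst this
    simp [pvScan]
  | cons b bs ih =>
    cases longer with
    | nil => simp at h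
    | cons a as =>
      have hlen : as.length = bs.length + 1 := by simpa using h
      by_cases hab : a = b
      · subst hab
        simp only [pvScan, beq_self_eq_true, if_true]
        rw [ih as hlen]
        constructor
        · rintro ⟨k, hk, rfl⟩
          exact ⟨k + 1, by simpa using Nat.succ_lt_succ hk, by simp [List.eraseIdx]⟩
        · rintro ⟨k, hk, hek⟩
          cases k with
          | zero =>
            simp [List.eraseIdx] at hek
            refine ⟨0, ?_, ?_⟩ <;> simp [← hek]
          | succ k =>
            simp [List.eraseIdx] at hek
            exact ⟨k, by simpa using Nat.lt_of_succ_lt_succ hk, hek⟩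
      · simp only [pvScan, beq_iff_eq, if_neg hab]
        constructor
        · intro he
          exact ⟨0, by simp, by simpa [List.eraseIdx] using he.symm⟩
        · rintro ⟨k, hk, hek⟩
          cases k with
          | zero =>
            simp [List.eraseIdx] at hek
            exact hek.symm
          | succ k =>
            simp [List.eraseIdx] at hek
            exact absurd hek.1.symm hab

-- A's loop over deletion positions, as an existential over eraseIdx
lemma anyDel_iff (s l : List Char) :
    ((PySem.List.pyRange 0 l.length 1).any (fun i =>
        s == PySem.List.slice l none (some i) ++ PySem.List.slice l (some (i + 1)) none)) = true ↔
      ∃ k < l.length, s = l.eraseIdx k := by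
  rw [List.any_eq_true]
  constructor
  · rintro ⟨i, hi, hp⟩
    rw [PySem.List.mem_pyRange_one] at hi
    obtain ⟨h0, hlt⟩ := hi
    refine ⟨i.toNat, by omega, ?_⟩
    rw [PySem.List.slice_to l h0, PySem.List.slice_from l (by omega : (0:Int) ≤ i + 1)] at hp
    have h1 : (i + 1).toNat = i.toNat + 1 := by omega
    rw [h1] at hp
    rw [List.eraseIdx_eq_take_drop_succ]
    exact eq_of_beq hp
  · rintro ⟨k, hk, rfl⟩
    refine ⟨(k : Int), by rw [PySem.List.mem_pyRange_one]; constructor <;> [positivity; exact_mod_cast hk], ?_⟩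
    rw [PySem.List.slice_to l (by positivity), PySem.List.slice_from l (by positivity)]
    have h1 : (((k : Int)) + 1).toNat = k + 1 := by omega
    have h0 : ((k : Int)).toNat = k := by omega
    rw [h1, h0, List.eraseIdx_eq_take_drop_succ]
    exact beq_self_eq_true _

lemma length_eraseIdx_of_lt {l : List Char} {k : ℕ} (hk : k < l.length) :
    (l.eraseIdx k).length = l.length - 1 := by
  rw [List.length_eraseIdx]
  simp [hk]

-- the core equality on the lowered character lists
lemma core_eq (s l : List Char) :
    (if (PySem.List.pyRange 0 l.length 1).any (fun i =>
        s == PySem.List.slice l none (some i) ++ PySem.List.slice l (some (i + 1)) none) then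
      true
    else if (PySem.List.pyRange 0 s.length 1).any (fun i =>
        PySem.List.slice s none (some i) ++ PySem.List.slice s (some (i + 1)) none == l) then
      true
    else false) =
    (if s.length == l.length + 1 then pvScan s l
     else if l.length == s.length + 1 then pvScan l s
     else false) := by
  have hA : ((PySem.List.pyRange 0 l.length 1).any (fun i =>
      s == PySem.List.slice l none (some i) ++ PySem.List.slice l (some (i + 1)) none)) = true ↔
      ∃ k < l.length, s = l.eraseIdx k := anyDel_iff s l
  have hB : ((PySem.List.pyRange 0 s.length 1).any (fun i =>
      PySem.List.slice s none (some i) ++ PySem.List.slice s (some (i + 1)) none == l)) = true ↔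
      ∃ k < s.length, l = s.eraseIdx k := by
    rw [show (fun i => PySem.List.slice s none (some i) ++ PySem.List.slice s (some (i + 1)) none == l)
        = (fun i => l == PySem.List.slice s none (some i) ++ PySem.List.slice s (some (i + 1)) none) from
      funext (fun i => by rw [Bool.beq_comm])]
    exact anyDel_iff l s
  -- fold A's early-return chain into a disjunction of the two loop results
  rw [show (if (PySem.List.pyRange 0 l.length 1).any (fun i =>
        s == PySem.List.slice l none (some i) ++ PySem.List.slice l (some (i + 1)) none) then
      true
    else if (PySem.List.pyRange 0 s.length 1).any (fun i =>
        PySem.List.slice s none (some i) ++ PySem.List.slice s (some (i + 1)) none == l) then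
      true
    else false) =
    (((PySem.List.pyRange 0 l.length 1).any (fun i =>
        s == PySem.List.slice l none (some i) ++ PySem.List.slice l (some (i + 1)) none)) ||
     ((PySem.List.pyRange 0 s.length 1).any (fun i =>
        PySem.List.slice s none (some i) ++ PySem.List.slice s (some (i + 1)) none == l))) from by
    rcases Bool.eq_false_or_eq_true ((PySem.List.pyRange 0 l.length 1).any (fun i =>
        s == PySem.List.slice l none (some i) ++ PySem.List.slice l (some (i + 1)) none)) with h | h <;>
      rcases Bool.eq_false_or_eq_true ((PySem.List.pyRange 0 s.length 1).any (fun i =>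
        PySem.List.slice s none (some i) ++ PySem.List.slice s (some (i + 1)) none == l)) with h' | h' <;>
      simp [h, h']]
  rcases Nat.lt_trichotomy s.length l.length with hlt | heq | hgt
  · by_cases hd : l.length = s.length + 1
    · -- deletion case: only the first loop can fire, B runs pvScan l s
      have hBfalse : ((PySem.List.pyRange 0 s.length 1).any (fun i =>
          PySem.List.slice s none (some i) ++ PySem.List.slice s (some (i + 1)) none == l)) = false := by
        rw [Bool.eq_false_iff, ne_eq, hB]
        rintro ⟨k, hk, hek⟩
        have hle := length_eraseIdx_of_lt hk
        rw [hek] at hd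
        omega
      have h1 : (s.length == l.length + 1) = false := by simp; omega
      have h2 : (l.length == s.length + 1) = true := by simp [hd]
      rw [hBfalse, h1, h2]
      simp only [Bool.or_false, Bool.false_eq_true, if_false, if_true]
      rw [Bool.eq_iff_iff, hA, pvScan_iff s l hd]
    · have hAfalse : ((PySem.List.pyRange 0 l.length 1).any (fun i =>
          s == PySem.List.slice l none (some i) ++ PySem.List.slice l (some (i + 1)) none)) = false := by
        rw [Bool.eq_false_iff, ne_eq, hA]
        rintro ⟨k, hk, hek⟩
        have hle := length_eraseIdx_of_lt hk
        rw [← hek] at hle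
        omega
      have hBfalse : ((PySem.List.pyRange 0 s.length 1).any (fun i =>
          PySem.List.slice s none (some i) ++ PySem.List.slice s (some (i + 1)) none == l)) = false := by
        rw [Bool.eq_false_iff, ne_eq, hB]
        rintro ⟨k, hk, hek⟩
        have hle := length_eraseIdx_of_lt hk
        rw [hek] at hlt
        omega
      have h1 : (s.length == l.length + 1) = false := by simp; omega
      have h2 : (l.length == s.length + 1) = false := by simp; omega
      rw [hAfalse, hBfalse, h1, h2]
      simp
  · have hAfalse : ((PySem.List.pyRange 0 l.length 1).any (fun i =>
        s == PySem.List.slice l none (some i) ++ PySem.List.slice l (some (i + 1)) none)) = false := by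
      rw [Bool.eq_false_iff, ne_eq, hA]
      rintro ⟨k, hk, hek⟩
      have hle := length_eraseIdx_of_lt hk
      rw [← hek] at hle
      omega
    have hBfalse : ((PySem.List.pyRange 0 s.length 1).any (fun i =>
        PySem.List.slice s none (some i) ++ PySem.List.slice s (some (i + 1)) none == l)) = false := by
      rw [Bool.eq_false_iff, ne_eq, hB]
      rintro ⟨k, hk, hek⟩
      have hle := length_eraseIdx_of_lt hk
      rw [← hek] at hle
      omega
    have h1 : (s.length == l.length + 1) = false := by simp; omega
    have h2 : (l.length == s.length + 1) = false := by simp; omega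
    rw [hAfalse, hBfalse, h1, h2]
    simp
  · by_cases hd : s.length = l.length + 1
    · -- insertion case: only the second loop can fire, B runs pvScan s l
      have hAfalse : ((PySem.List.pyRange 0 l.length 1).any (fun i =>
          s == PySem.List.slice l none (some i) ++ PySem.List.slice l (some (i + 1)) none)) = false := by
        rw [Bool.eq_false_iff, ne_eq, hA]
        rintro ⟨k, hk, hek⟩
        have hle := length_eraseIdx_of_lt hk
        rw [← hek] at hle
        omega
      have h1 : (s.length == l.length + 1) = true := by simp [hd]
      rw [hAfalse, h1]
      simp only [Bool.false_or, if_true]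
      rw [Bool.eq_iff_iff, hB, pvScan_iff l s hd]
    · have hAfalse : ((PySem.List.pyRange 0 l.length 1).any (fun i =>
          s == PySem.List.slice l none (some i) ++ PySem.List.slice l (some (i + 1)) none)) = false := by
        rw [Bool.eq_false_iff, ne_eq, hA]
        rintro ⟨k, hk, hek⟩
        have hle := length_eraseIdx_of_lt hk
        rw [← hek] at hle
        omega
      have hBfalse : ((PySem.List.pyRange 0 s.length 1).any (fun i =>
          PySem.List.slice s none (some i) ++ PySem.List.slice s (some (i + 1)) none == l)) = false := by
        rw [Bool.eq_false_iff, ne_eq, hB]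
        rintro ⟨k, hk, hek⟩
        have hle := length_eraseIdx_of_lt hk
        rw [← hek] at hle
        omega
      have h1 : (s.length == l.length + 1) = false := by simp; omega
      have h2 : (l.length == s.length + 1) = false := by simp; omega
      rw [hAfalse, hBfalse, h1, h2]
      simp

-- ===== VERDICT (by name: the statement is the Claim_ definition above) =====
theorem check_insertion_deletion_py_spec : Claim_equal_check_insertion_deletion_py := by
  intro suspicious legitimate _
  unfold Spec_check_insertion_deletion_py check_insertion_deletion_py check_insertion_deletion_py_alt
  exact core_eq (PySem.Chars.lower suspicious.toList) (PySem.Chars.lower legitimate.toList)
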